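-- pv_equiv track=rewrite | github.com/fabriciodisalvo/super-duper-spork | cryptogram_helper.py | check_word_format
-- ===== SOURCE A (Python) =====
-- letters = ['A', 'B', 'C', 'D', 'E', 'F', 'G', 'H', 'I', 'J', 'K', 'L', 'M', 'N', 'O', 'P', 'Q', 'R', 'S', 'T', 'U', 'V', 'W', 'X', 'Y', 'Z']
--
-- def check_word_format(word):
--     available_letters = letters.copy()
--     word_format = ""
--     dict_letters = {}
--     for letter in word:
--         if letter in dict_letters:
--             word_format = word_format + dict_letters[letter]
--         else:
--             dict_letters[letter] = available_letters.pop(0)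
--             word_format = word_format + dict_letters[letter]
--     return(word_format)
-- ===== SOURCE B (Python) =====
-- letters = ['A', 'B', 'C', 'D', 'E', 'F', 'G', 'H', 'I', 'J', 'K', 'L', 'M', 'N', 'O', 'P', 'Q', 'R', 'S', 'T', 'U', 'V', 'W', 'X', 'Y', 'Z']
--
-- def check_word_format(word):
--     # Each character's code letter is determined positionally: it is letters[r]
--     # where r = number of distinct characters strictly before the character's
--     # first occurrence.  No mapping or pool is maintained at all.
--     return ''.join(letters[len(set(word[:word.index(c)]))] for c in word)
-- ===== Notes on version B (the rewrite author's own statement) =====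
-- stated objective: alternative
-- what changed: B maintains no mapping and no pool at all: each output character is computed positionally as letters[r] where r = len(set(word[:word.index(c)])), the number of distinct characters before c's first occurrence, so the stateful dict/pop loop disappears entirely.
import Mathlib
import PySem

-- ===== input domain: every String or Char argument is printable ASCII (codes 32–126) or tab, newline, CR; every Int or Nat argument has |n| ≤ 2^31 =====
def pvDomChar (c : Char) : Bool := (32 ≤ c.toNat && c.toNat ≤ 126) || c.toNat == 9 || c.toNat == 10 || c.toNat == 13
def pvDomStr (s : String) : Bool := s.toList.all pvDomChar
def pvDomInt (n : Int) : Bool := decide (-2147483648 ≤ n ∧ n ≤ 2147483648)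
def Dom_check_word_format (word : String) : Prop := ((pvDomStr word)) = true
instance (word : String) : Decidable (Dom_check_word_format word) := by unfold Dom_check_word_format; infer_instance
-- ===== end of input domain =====

-- B is stateless: each output char is letters[r] with r = #distinct chars before c's first occurrence (no dict, no pool).

-- ===== PORT A =====
def pvLetters : List Char :=
  ['A', 'B', 'C', 'D', 'E', 'F', 'G', 'H', 'I', 'J', 'K', 'L', 'M',
   'N', 'O', 'P', 'Q', 'R', 'S', 'T', 'U', 'V', 'W', 'X', 'Y', 'Z']

-- one iteration of A's loop; state = (available_letters, dict_letters, word_format as List Char)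
def pvAStep (st : List Char × PySem.Dict Char Char × List Char) (c : Char) :
    List Char × PySem.Dict Char Char × List Char :=
  if st.2.1.contains c then
    (st.1, st.2.1, st.2.2 ++ [st.2.1.getD c ' '])
  else
    match st.1 with
    | [] => st            -- available_letters.pop(0) raises IndexError here; excluded by Pre_
    | q :: ps => (ps, st.2.1.insert c q, st.2.2 ++ [q])

def check_word_format (word : String) : String :=
  String.mk (word.toList.foldl pvAStep (pvLetters, PySem.Dict.empty, [])).2.2

-- ===== PORT B =====
-- letters[len(set(word[:word.index(c)]))] for each c of word; word.index(c) always
-- succeeds (c is drawn from word), so the 'none' arm is unreachable; letters[r]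
-- raises IndexError only when r ≥ 26, excluded by Pre_ (hence .getD ' ').
def check_word_format_alt (word : String) : String :=
  String.mk (word.toList.map (fun c =>
    match PySem.List.index? word.toList c with
    | some i =>
        (PySem.List.pyGet? pvLetters
          (((PySem.Set.ofList (PySem.List.slice word.toList none (some (i : Int)))).length : Nat) : Int)).getD ' '
    | none => ' '))

-- ===== PRECONDITION & SPEC =====
-- Pre_ excludes only the words with more than 26 distinct characters, on which A (and B) raise IndexError.
def Pre_check_word_format (word : String) : Prop :=
  (PySem.List.dedup word.toList).length ≤ 26
instance (word : String) : Decidable (Pre_check_word_format word) := by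
  unfold Pre_check_word_format; infer_instance

def pvWitness_check_word_format : String := "HELLO"

def Spec_check_word_format (word : String) (out : String) : Prop := out = check_word_format_alt word
instance (word : String) (out : String) : Decidable (Spec_check_word_format word out) := by unfold Spec_check_word_format; infer_instance

-- ===== CLAIM =====
def Claim_equal_check_word_format : Prop := ∀ (word : String), Dom_check_word_format word → Pre_check_word_format word → Spec_check_word_format word (check_word_format word)

-- ===== LEMMAS AND PROOFS =====

-- proof-side skeleton of A's loop: just the (dict, pool) evolution, output dropped
def pvSStep (st : PySem.Dict Char Char × List Char) (c : Char) : PySem.Dict Char Char × List Char :=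
  if st.1.contains c then st
  else
    match st.2 with
    | [] => st
    | q :: ps => (st.1.insert c q, ps)

lemma pvS_mono (cs : List Char) (st : PySem.Dict Char Char × List Char) (k : Char)
    (hk : st.1.contains k = true) :
    (cs.foldl pvSStep st).1.get? k = st.1.get? k ∧ (cs.foldl pvSStep st).1.contains k = true := by
  induction cs generalizing st with
  | nil => exact ⟨rfl, hk⟩
  | cons c cs ih =>
    by_cases h : st.1.contains c = true
    · simpa [pvSStep, h] using ih st hk
    · cases hp : st.2 with
      | nil => simpa [pvSStep, h, hp] using ih st hk
      | cons q ps =>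
        have hkc : k ≠ c := by intro e; rw [e] at hk; exact absurd hk (by simp [h])
        have hk' : (st.1.insert c q).contains k = true := by
          simp [PySem.Dict.contains_insert, hk]
        have hstep : pvSStep st c = (st.1.insert c q, ps) := by
          cases st; simp_all [pvSStep]
        rw [List.foldl_cons, hstep]
        have := ih (st.1.insert c q, ps) hk'
        refine ⟨?_, this.2⟩
        rw [this.1]
        simp [PySem.Dict.get?_insert, hkc]

lemma pvDedup_cons (x : Char) (xs : List Char) :
    PySem.List.dedup (x :: xs) = x :: (PySem.List.dedup xs).filter (fun y => y != x) := by
  rw [PySem.List.dedup_eq_ofList, PySem.Set.ofList_cons]; rfl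

lemma pvOutEq (cs : List Char) (d : PySem.Dict Char Char) (pool out : List Char)
    (H : (PySem.List.dedup cs).countP (fun c => !(d.contains c)) ≤ pool.length) :
    (cs.foldl pvAStep (pool, d, out)).2.2 =
      out ++ cs.map (fun c => (cs.foldl pvSStep (d, pool)).1.getD c ' ') := by
  induction cs generalizing d pool out with
  | nil => simp
  | cons c rest ih =>
    rw [pvDedup_cons, List.countP_cons] at H
    by_cases hc : d.contains c = true
    · simp only [hc, Bool.not_true, Bool.false_eq_true, if_false, add_zero] at H
      have H' : (PySem.List.dedup rest).countP (fun a => !(d.contains a)) ≤ pool.length := by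
        calc (PySem.List.dedup rest).countP (fun a => !(d.contains a))
            ≤ (PySem.List.dedup rest).countP (fun a => !(d.contains a) && (a != c)) := by
              apply List.countP_mono_left
              intro x _ hx
              have hxc : x ≠ c := by rintro rfl; simp [hc] at hx
              simp_all
          _ = ((PySem.List.dedup rest).filter (fun y => y != c)).countP (fun a => !(d.contains a)) := by
              rw [List.countP_filter]
          _ ≤ pool.length := H
      have hget := (pvS_mono rest (d, pool) c hc).1
      simp only [List.foldl_cons, pvAStep, pvSStep, hc, if_pos, ih d pool _ H']
      simp [PySem.Dict.getD_eq_get?_getD, hget]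
    · have hc' : d.contains c = false := by simpa using hc
      simp only [hc', Bool.not_false, if_pos] at H
      cases pool with
      | nil => simp at H
      | cons q ps =>
        have H' : (PySem.List.dedup rest).countP (fun a => !((d.insert c q).contains a)) ≤ ps.length := by
          calc (PySem.List.dedup rest).countP (fun a => !((d.insert c q).contains a))
              ≤ (PySem.List.dedup rest).countP (fun a => !(d.contains a) && (a != c)) := by
                apply List.countP_mono_left
                intro x _ hx
                simp [PySem.Dict.contains_insert] at hx
                simp [hx.1, hx.2]
            _ = ((PySem.List.dedup rest).filter (fun y => y != c)).countP (fun a => !(d.contains a)) := by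
                rw [List.countP_filter]
            _ ≤ ps.length := by rw [List.length_cons] at H; omega
        have hcont : (d.insert c q).contains c = true := PySem.Dict.contains_insert_self _ _ _
        have hget := (pvS_mono rest (d.insert c q, ps) c hcont).1
        simp only [List.foldl_cons, pvAStep, pvSStep, hc', Bool.false_eq_true, if_false]
        rw [ih (d.insert c q) ps (out ++ [q]) H']
        simp [PySem.Dict.getD_eq_get?_getD, hget, PySem.Dict.get?_insert_self]

-- Set.add along a fold never shrinks the set
lemma pvSet_foldl_len (l : List Char) (t : PySem.Set Char) :
    t.length ≤ (l.foldl PySem.Set.add t).length := by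
  induction l generalizing t with
  | nil => exact le_refl _
  | cons x l ih =>
    rw [List.foldl_cons]
    refine le_trans ?_ (ih (PySem.Set.add t x))
    rw [PySem.Set.add_eq_ite]
    by_cases h : x ∈ t <;> simp [h]

-- the rank of a character (distinct chars before its first occurrence) is strictly
-- below the total number of distinct characters
lemma pvRank_lt (s : List Char) (c : Char) (i : Nat)
    (hi : PySem.List.index? s c = some i) :
    (PySem.List.dedup (s.take i)).length < (PySem.List.dedup s).length := by
  obtain ⟨pre, suf, rfl, rfl, hnp⟩ := (PySem.List.index?_eq_some_iff s c i).mp hi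
  rw [List.take_left]
  rw [PySem.List.dedup_eq_ofList, PySem.List.dedup_eq_ofList,
      PySem.Set.ofList_eq_foldl, PySem.Set.ofList_eq_foldl, List.foldl_append,
      List.foldl_cons]
  have hmem : c ∉ pre.foldl PySem.Set.add [] := by
    intro h
    exact hnp ((PySem.Set.mem_ofList _ _).mp (by rwa [PySem.Set.ofList_eq_foldl]))
  have hadd : PySem.Set.add (pre.foldl PySem.Set.add []) c
      = pre.foldl PySem.Set.add [] ++ [c] := by
    rw [PySem.Set.add_eq_ite, if_neg hmem]
  rw [hadd]
  calc (pre.foldl PySem.Set.add []).length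
      < (pre.foldl PySem.Set.add [] ++ [c]).length := by simp
    _ ≤ (suf.foldl PySem.Set.add (pre.foldl PySem.Set.add [] ++ [c])).length :=
        pvSet_foldl_len _ _

-- characterization of A's (dict, pool) state after processing s
lemma pvS_char (s : List Char) (h : (PySem.List.dedup s).length ≤ 26) :
    (s.foldl pvSStep (PySem.Dict.empty, pvLetters)).2
        = pvLetters.drop (PySem.List.dedup s).length ∧
    ∀ c, (s.foldl pvSStep (PySem.Dict.empty, pvLetters)).1.get? c =
      (PySem.List.index? s c).bind
        (fun i => pvLetters[(PySem.List.dedup (s.take i)).length]?) := by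
  induction s using List.reverseRecOn with
  | nil =>
    refine ⟨rfl, fun c => ?_⟩
    simp [PySem.Dict.get?_empty, PySem.List.index?_eq_idxOf?]
  | append_singleton s c ih =>
    have hmon : (PySem.List.dedup s).length ≤ (PySem.List.dedup (s ++ [c])).length := by
      rw [PySem.List.dedup_eq_ofList, PySem.List.dedup_eq_ofList,
          PySem.Set.ofList_eq_foldl, PySem.Set.ofList_eq_foldl, List.foldl_append,
          List.foldl_cons, List.foldl_nil]
      exact le_trans (by rw [PySem.Set.add_eq_ite]; by_cases hx : c ∈ s.foldl PySem.Set.add [] <;> simp [hx]) (le_refl _)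
    obtain ⟨hpool, hget⟩ := ih (le_trans hmon h)
    rw [List.foldl_append, List.foldl_cons, List.foldl_nil]
    set st := s.foldl pvSStep (PySem.Dict.empty, pvLetters) with hst
    by_cases hcs : c ∈ s
    · -- repeated character: the state is unchanged
      have hded : PySem.List.dedup (s ++ [c]) = PySem.List.dedup s := by
        rw [PySem.List.dedup_eq_ofList, PySem.List.dedup_eq_ofList,
            PySem.Set.ofList_append_singleton, PySem.Set.add_eq_ite,
            if_pos ((PySem.Set.mem_ofList _ _).mpr hcs)]
      obtain ⟨i, hi⟩ := Option.isSome_iff_exists.mp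
        ((PySem.List.index?_isSome_iff s c).mpr hcs)
      have hilt : i < s.length := (PySem.List.getElem_of_index?_eq_some hi).1
      have hrk := pvRank_lt s c i hi
      have hcont : st.1.contains c = true := by
        rw [PySem.Dict.contains_eq_isSome_get?, hget c, hi, Option.bind_some]
        have hlt' : (PySem.List.dedup (s.take i)).length < pvLetters.length := by
          simp only [pvLetters, List.length_cons, List.length_nil]
          omega
        rw [List.getElem?_eq_getElem hlt']
        rfl
      have hid : pvSStep st c = st := by
        simp [pvSStep, hcont]
      rw [hid, hded]
      refine ⟨hpool, fun x => ?_⟩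
      rw [hget x]
      by_cases hxs : x ∈ s
      · rw [PySem.List.index?_append_of_mem [c] hxs]
        obtain ⟨j, hj⟩ := Option.isSome_iff_exists.mp
          ((PySem.List.index?_isSome_iff s x).mpr hxs)
        have hjlt : j < s.length := (PySem.List.getElem_of_index?_eq_some hj).1
        rw [hj, Option.bind_some, Option.bind_some,
            List.take_append_of_le_length (by omega)]
      · have h1 : PySem.List.index? s x = none :=
          (PySem.List.index?_eq_none_iff s x).mpr hxs
        have h2 : PySem.List.index? (s ++ [c]) x = none := by
          refine (PySem.List.index?_eq_none_iff _ x).mpr ?_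
          simp [hxs]
          rintro rfl; exact hxs hcs
        rw [h1, h2]
        rfl
    · -- new character: it receives letters[n] and the pool shrinks
      have hded : PySem.List.dedup (s ++ [c]) = PySem.List.dedup s ++ [c] := by
        rw [PySem.List.dedup_eq_ofList, PySem.List.dedup_eq_ofList,
            PySem.Set.ofList_append_singleton, PySem.Set.add_eq_ite,
            if_neg (fun hx => hcs ((PySem.Set.mem_ofList _ _).mp hx))]
      have hn : (PySem.List.dedup (s ++ [c])).length
          = (PySem.List.dedup s).length + 1 := by rw [hded]; simp
      have hlt : (PySem.List.dedup s).length < 26 := by omega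
      have hcont : st.1.contains c = false := by
        rw [PySem.Dict.contains_eq_isSome_get?, hget c,
            (PySem.List.index?_eq_none_iff s c).mpr hcs]
        rfl
      have hlen : (PySem.List.dedup s).length < pvLetters.length := by
        simpa [pvLetters] using hlt
      have hdrop : st.2 = pvLetters[(PySem.List.dedup s).length] ::
          pvLetters.drop ((PySem.List.dedup s).length + 1) := by
        rw [hpool, List.drop_eq_getElem_cons hlen]
      have hstep : pvSStep st c =
          (st.1.insert c pvLetters[(PySem.List.dedup s).length],
           pvLetters.drop ((PySem.List.dedup s).length + 1)) := by
        simp only [pvSStep, hcont, Bool.false_eq_true, if_false, hdrop]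
      rw [hstep, hn]
      refine ⟨rfl, fun x => ?_⟩
      by_cases hxc : x = c
      · subst hxc
        rw [PySem.Dict.get?_insert_self,
            PySem.List.index?_append_singleton_self _ _ hcs, Option.bind_some,
            List.take_left]
        rw [List.getElem?_eq_getElem hlen]
      · rw [PySem.Dict.get?_insert_of_ne _ _ hxc, hget x]
        by_cases hxs : x ∈ s
        · rw [PySem.List.index?_append_of_mem [c] hxs]
          obtain ⟨j, hj⟩ := Option.isSome_iff_exists.mp
            ((PySem.List.index?_isSome_iff s x).mpr hxs)
          have hjlt : j < s.length := (PySem.List.getElem_of_index?_eq_some hj).1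
          rw [hj, Option.bind_some, Option.bind_some,
              List.take_append_of_le_length (by omega)]
        · have h1 : PySem.List.index? s x = none :=
            (PySem.List.index?_eq_none_iff s x).mpr hxs
          have h2 : PySem.List.index? (s ++ [c]) x = none := by
            refine (PySem.List.index?_eq_none_iff _ x).mpr ?_
            simp [hxs, hxc]
          rw [h1, h2]
          rfl

-- ===== VERDICT =====
theorem check_word_format_spec : Claim_equal_check_word_format := by
  intro word _ hpre
  unfold Spec_check_word_format check_word_format check_word_format_alt
  have H : (PySem.List.dedup word.toList).countP
      (fun c => !((PySem.Dict.empty : PySem.Dict Char Char).contains c)) ≤ pvLetters.length := by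
    simpa [PySem.Dict.contains_empty, pvLetters] using hpre
  rw [pvOutEq word.toList PySem.Dict.empty pvLetters [] H]
  obtain ⟨_, hget⟩ := pvS_char word.toList hpre
  rw [List.nil_append]
  congr 1
  apply List.map_congr_left
  intro c hc
  obtain ⟨i, hi⟩ := Option.isSome_iff_exists.mp
    ((PySem.List.index?_isSome_iff word.toList c).mpr hc)
  rw [PySem.Dict.getD_eq_get?_getD, hget c, hi, Option.bind_some]
  simp [PySem.List.slice_to_natCast, PySem.List.pyGet?_natCast,
        PySem.List.dedup_eq_ofList]
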